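-- pv_equiv track=rewrite | github.com/Arsen1302/Code-copy-detector | TestData/solutions/problem_1393_5.py | solution_1393_5
-- ===== SOURCE A (Python) =====
-- def solution_1393_5(colors: str) -> bool:
--
--     acount=0
--     bcount=0
--
--     for i in range(len(colors)):
--         c=colors[i]
--         if(c=='A' and i-1>=0 and i+1<len(colors) and colors[i-1]=='A' and colors[i+1]=='A'):
--             acount+=1
--         if(c=='B' and i-1>=0 and i+1<len(colors) and colors[i-1]=='B' and colors[i+1]=='B'):
--             bcount+=1
--
--     if(acount<=bcount):
--         return False
--     else:
--         return True
-- ===== SOURCE B (Python) =====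
-- def solution_1393_5(colors: str) -> bool:
--     acount = 0
--     bcount = 0
--     i = 0
--     n = len(colors)
--     while i < n:
--         ch = colors[i]
--         j = i
--         while j < n and colors[j] == ch:
--             j += 1
--         run = j - i
--         if ch == 'A':
--             acount += max(0, run - 2)
--         elif ch == 'B':
--             bcount += max(0, run - 2)
--         i = j
--     return acount > bcount
-- ===== Notes on version B (the rewrite author's own statement) =====
-- stated objective: alternative
-- what changed: B scans maximal runs of equal characters and adds max(0, run_length - 2) per 'A'/'B' run, instead of A's per-index neighbour checks with three lookups at every position.
import Mathlib
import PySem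

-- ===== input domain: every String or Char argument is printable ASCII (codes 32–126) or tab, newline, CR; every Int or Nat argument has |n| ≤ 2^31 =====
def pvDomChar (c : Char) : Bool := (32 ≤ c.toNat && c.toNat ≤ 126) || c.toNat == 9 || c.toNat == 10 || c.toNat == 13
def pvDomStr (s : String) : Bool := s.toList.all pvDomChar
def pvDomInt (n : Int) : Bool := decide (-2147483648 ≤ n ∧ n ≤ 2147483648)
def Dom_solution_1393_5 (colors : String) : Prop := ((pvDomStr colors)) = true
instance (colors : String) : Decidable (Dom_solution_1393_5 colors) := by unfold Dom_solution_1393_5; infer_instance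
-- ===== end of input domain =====

-- B replaces A's per-index neighbour checks by a single run-length scan: for each maximal
-- run of equal characters it adds max(0, run_length - 2) to the 'A' or 'B' counter.


-- ===== PORT A =====
-- one step of A's loop body at index i (the two guarded ifs, in order)
def aStep (cs : List Char) (ab : Int × Int) (i : Int) : Int × Int :=
  let c := PySem.List.pyGet? cs i
  let ab1 :=
    if c = some 'A' ∧ 0 ≤ i - 1 ∧ i + 1 < (cs.length : Int) ∧
        PySem.List.pyGet? cs (i - 1) = some 'A' ∧ PySem.List.pyGet? cs (i + 1) = some 'A'
    then (ab.1 + 1, ab.2) else ab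
  if c = some 'B' ∧ 0 ≤ i - 1 ∧ i + 1 < (cs.length : Int) ∧
      PySem.List.pyGet? cs (i - 1) = some 'B' ∧ PySem.List.pyGet? cs (i + 1) = some 'B'
  then (ab1.1, ab1.2 + 1) else ab1

def solution_1393_5 (colors : String) : Bool :=
  let cs := colors.toList
  let ab := (PySem.List.pyRange 0 (cs.length : Int) 1).foldl (aStep cs) (0, 0)
  if ab.1 ≤ ab.2 then false else true

-- ===== PORT B =====
-- B's outer while loop: consume one maximal run per step
def bLoop : List Char → Int → Int → Int × Int
  | [], a, b => (a, b)
  | x :: xs, a, b =>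
    let run : Int := ((xs.takeWhile (· = x)).length : Int) + 1
    let rest := xs.dropWhile (· = x)
    if x = 'A' then bLoop rest (a + max 0 (run - 2)) b
    else if x = 'B' then bLoop rest a (b + max 0 (run - 2))
    else bLoop rest a b
termination_by cs => cs.length
decreasing_by all_goals
  exact Nat.lt_succ_of_le (List.length_dropWhile_le _ _)

def solution_1393_5_alt (colors : String) : Bool :=
  let ab := bLoop colors.toList 0 0
  decide (ab.1 > ab.2)

-- ===== PRECONDITION & SPEC =====
def Spec_solution_1393_5 (colors : String) (out : Bool) : Prop := out = solution_1393_5_alt colors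
instance (colors : String) (out : Bool) : Decidable (Spec_solution_1393_5 colors out) := by unfold Spec_solution_1393_5; infer_instance

-- ===== CLAIM (what is proved, stated in full; the proofs are below) =====
def Claim_equal_solution_1393_5 : Prop := ∀ (colors : String), Dom_solution_1393_5 colors → Spec_solution_1393_5 colors (solution_1393_5 colors)

-- ===== LEMMAS AND PROOFS =====

-- number of indices whose 3-window is all `ch` (the common middle ground of the two programs)
def cnt (ch : Char) : List Char → Int
  | a :: b :: c :: t => (if a = ch ∧ b = ch ∧ c = ch then 1 else 0) + cnt ch (b :: c :: t)
  | _ => 0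

lemma cnt_cons3 (ch a b c : Char) (t : List Char) :
    cnt ch (a :: b :: c :: t)
      = (if a = ch ∧ b = ch ∧ c = ch then 1 else 0) + cnt ch (b :: c :: t) := rfl

lemma cnt_short (ch : Char) (l : List Char) (h : l.length ≤ 2) : cnt ch l = 0 := by
  match l, h with
  | [], _ => rfl
  | [_], _ => rfl
  | [_, _], _ => rfl

lemma cnt_cons_ne (ch x : Char) (rest : List Char)
    (h : ∀ y, rest.head? = some y → y ≠ x) :
    cnt ch (x :: rest) = cnt ch rest := by
  match rest with
  | [] => rfl
  | [r0] => rfl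
  | r0 :: r1 :: t =>
    have hr0 : r0 ≠ x := h r0 rfl
    have hno : ¬ (x = ch ∧ r0 = ch ∧ r1 = ch) := by
      rintro ⟨hx, hr, _⟩; exact hr0 (hr.trans hx.symm)
    rw [cnt_cons3, if_neg hno, Int.zero_add]

lemma cnt_run (ch x : Char) (rest : List Char)
    (h : ∀ y, rest.head? = some y → y ≠ x) :
    ∀ k, cnt ch (List.replicate k x ++ rest)
      = (if x = ch then max 0 ((k : Int) - 2) else 0) + cnt ch rest := by
  intro k
  induction k using Nat.strong_induction_on with
  | _ k ih =>
    match k with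
    | 0 =>
      simp only [List.replicate, List.nil_append, Nat.cast_zero]
      split <;> simp
    | 1 =>
      simp only [List.replicate, List.nil_append, List.cons_append, Nat.cast_one]
      rw [cnt_cons_ne ch x rest h]
      split <;> simp
    | 2 =>
      have h3 : cnt ch (x :: x :: rest) = cnt ch (x :: rest) := by
        match rest with
        | [] => rfl
        | r0 :: t =>
          have hr0 : r0 ≠ x := h r0 rfl
          have hno : ¬ (x = ch ∧ x = ch ∧ r0 = ch) := by
            rintro ⟨hx, _, hr⟩; exact hr0 (hr.trans hx.symm)
          rw [cnt_cons3, if_neg hno, Int.zero_add]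
      simp only [List.replicate, List.nil_append, List.cons_append]
      rw [h3, cnt_cons_ne ch x rest h]
      split <;> simp
    | (m + 3) =>
      have ihm : cnt ch (List.replicate (m + 2) x ++ rest)
          = (if x = ch then max 0 (((m + 2 : Nat) : Int) - 2) else 0) + cnt ch rest :=
        ih (m + 2) (by omega)
      have hsplit : List.replicate (m + 3) x ++ rest
          = x :: x :: x :: (List.replicate m x ++ rest) := by
        simp [List.replicate_succ]
      have hsplit2 : List.replicate (m + 2) x ++ rest
          = x :: x :: (List.replicate m x ++ rest) := by
        simp [List.replicate_succ]
      rw [hsplit, cnt_cons3, ← hsplit2, ihm]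
      by_cases hx : x = ch
      · simp only [hx, and_self, if_true]
        push_cast
        omega
      · have hno : ¬ (x = ch ∧ x = ch ∧ x = ch) := by tauto
        rw [if_neg hno, if_neg hx, if_neg hx]
        omega

-- head of dropWhile fails the predicate
lemma head_dropWhile_ne (x : Char) (xs : List Char) :
    ∀ y, (xs.dropWhile (· = x)).head? = some y → y ≠ x := by
  intro y hy
  have := List.head?_dropWhile_not (· = x) xs
  rw [hy] at this
  simpa using this

lemma run_decomp (x : Char) (xs : List Char) :
    x :: xs = List.replicate ((xs.takeWhile (· = x)).length + 1) x ++ xs.dropWhile (· = x) := by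
  have ht : xs.takeWhile (· = x) = List.replicate (xs.takeWhile (· = x)).length x := by
    rw [List.eq_replicate_iff]
    refine ⟨rfl, fun b hb => ?_⟩
    have := List.mem_takeWhile_imp hb
    simpa using this
  conv_lhs => rw [← List.takeWhile_append_dropWhile (p := (· = x)) (l := xs)]
  rw [List.replicate_succ, List.cons_append]
  congr 1
  conv_lhs => rw [ht]

-- the run decomposition of the window count at the head of the list
lemma cnt_head_run (ch x : Char) (xs : List Char) :
    cnt ch (x :: xs)
      = (if x = ch then max 0 ((((xs.takeWhile (· = x)).length : Int) + 1) - 2) else 0)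
        + cnt ch (xs.dropWhile (· = x)) := by
  have hne := head_dropWhile_ne x xs
  rw [run_decomp x xs, cnt_run ch x _ hne ((xs.takeWhile (· = x)).length + 1)]
  push_cast
  ring_nf

-- B's loop computes the window counts
lemma bLoop_eq : ∀ (n : Nat) (cs : List Char), cs.length ≤ n → ∀ a b,
    bLoop cs a b = (a + cnt 'A' cs, b + cnt 'B' cs) := by
  intro n
  induction n with
  | zero =>
    intro cs hcs a b
    match cs, hcs with
    | [], _ => simp [bLoop, cnt_short]
  | succ n ih =>
    intro cs hcs a b
    match cs with
    | [] => simp [bLoop, cnt_short]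
    | x :: xs =>
      rw [bLoop]
      have hrest : (xs.dropWhile (· = x)).length ≤ n := by
        have := List.length_dropWhile_le (· = x) xs
        simp at hcs; omega
      have hA := cnt_head_run 'A' x xs
      have hB := cnt_head_run 'B' x xs
      by_cases h1 : x = 'A'
      · rw [if_pos h1, ih _ hrest, hA, hB, if_pos h1, if_neg (by rw [h1]; decide)]
        simp only [Prod.mk.injEq]; constructor <;> ring
      · rw [if_neg h1]
        by_cases h2 : x = 'B'
        · rw [if_pos h2, ih _ hrest, hA, hB, if_neg h1, if_pos h2]
          simp only [Prod.mk.injEq]; constructor <;> ring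
        · rw [if_neg h2, ih _ hrest, hA, hB, if_neg h1, if_neg h2]
          simp only [Prod.mk.injEq]; constructor <;> ring

-- A's loop from index j ≥ 1 adds the window counts of the suffix starting at j-1
lemma aFold (cs : List Char) :
    ∀ d j a b, cs.length - j = d → 1 ≤ j →
      (PySem.List.pyRange (j : Int) (cs.length : Int) 1).foldl (aStep cs) (a, b)
        = (a + cnt 'A' (cs.drop (j - 1)), b + cnt 'B' (cs.drop (j - 1))) := by
  intro d
  induction d with
  | zero =>
    intro j a b hd hj
    have hempty : PySem.List.pyRange (j : Int) (cs.length : Int) 1 = [] := by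
      rw [PySem.List.pyRange_one]
      have h0 : ((cs.length : Int) - (j : Int)).toNat = 0 := by omega
      simp [h0]
    rw [hempty, List.foldl_nil]
    have hlen : (cs.drop (j - 1)).length ≤ 2 := by
      rw [List.length_drop]; omega
    rw [cnt_short _ _ hlen, cnt_short _ _ hlen]; simp
  | succ d ih =>
    intro j a b hd hj
    have hjn : j < cs.length := by omega
    have hcons : PySem.List.pyRange (j : Int) (cs.length : Int) 1
        = (j : Int) :: PySem.List.pyRange ((j : Int) + 1) (cs.length : Int) 1 :=
      PySem.List.pyRange_one_cons (by exact_mod_cast hjn)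
    have hcast : ((j : Int) + 1) = ((j + 1 : Nat) : Int) := by push_cast; ring
    rw [hcons, List.foldl_cons, hcast]
    by_cases hmid : j + 1 < cs.length
    · -- all three indices j-1, j, j+1 are in range
      have e0 : PySem.List.pyGet? cs (j : Int) = some cs[j] :=
        PySem.List.pyGet?_ofNat cs j (by omega)
      have em : PySem.List.pyGet? cs ((j : Int) - 1) = some cs[j - 1] := by
        have hc : ((j : Int) - 1) = ((j - 1 : Nat) : Int) := by omega
        rw [hc]; exact PySem.List.pyGet?_ofNat cs (j - 1) (by omega)
      have ep : PySem.List.pyGet? cs ((j : Int) + 1) = some cs[j + 1] := by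
        rw [hcast]; exact PySem.List.pyGet?_ofNat cs (j + 1) (by omega)
      have hg1 : (0 : Int) ≤ (j : Int) - 1 := by omega
      have hg2 : (j : Int) + 1 < (cs.length : Int) := by exact_mod_cast hmid
      have hstep : aStep cs (a, b) (j : Int)
          = (a + (if cs[j - 1] = 'A' ∧ cs[j] = 'A' ∧ cs[j + 1] = 'A' then 1 else 0),
             b + (if cs[j - 1] = 'B' ∧ cs[j] = 'B' ∧ cs[j + 1] = 'B' then 1 else 0)) := by
        simp only [aStep, e0, em, ep, Option.some.injEq]
        by_cases cA : cs[j - 1] = 'A' ∧ cs[j] = 'A' ∧ cs[j + 1] = 'A'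
        · have cB : ¬ (cs[j - 1] = 'B' ∧ cs[j] = 'B' ∧ cs[j + 1] = 'B') := by
            rintro ⟨_, hb, _⟩; rw [cA.2.1] at hb; exact absurd hb (by decide)
          have hAfull : cs[j] = 'A' ∧ (0 : Int) ≤ (j : Int) - 1 ∧ (j : Int) + 1 < (cs.length : Int) ∧
              cs[j - 1] = 'A' ∧ cs[j + 1] = 'A' := ⟨cA.2.1, hg1, hg2, cA.1, cA.2.2⟩
          have hBfull : ¬ (cs[j] = 'B' ∧ (0 : Int) ≤ (j : Int) - 1 ∧ (j : Int) + 1 < (cs.length : Int) ∧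
              cs[j - 1] = 'B' ∧ cs[j + 1] = 'B') := by
            rintro ⟨hb1, _, _, hb4, hb6⟩; exact cB ⟨hb4, hb1, hb6⟩
          rw [if_neg hBfull, if_pos hAfull, if_pos cA, if_neg cB]
          simp
        · have hAfull : ¬ (cs[j] = 'A' ∧ (0 : Int) ≤ (j : Int) - 1 ∧ (j : Int) + 1 < (cs.length : Int) ∧
              cs[j - 1] = 'A' ∧ cs[j + 1] = 'A') := by
            rintro ⟨ha1, _, _, ha4, ha6⟩; exact cA ⟨ha4, ha1, ha6⟩
          by_cases cB : cs[j - 1] = 'B' ∧ cs[j] = 'B' ∧ cs[j + 1] = 'B'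
          · have hBfull : cs[j] = 'B' ∧ (0 : Int) ≤ (j : Int) - 1 ∧ (j : Int) + 1 < (cs.length : Int) ∧
                cs[j - 1] = 'B' ∧ cs[j + 1] = 'B' := ⟨cB.2.1, hg1, hg2, cB.1, cB.2.2⟩
            rw [if_pos hBfull, if_neg hAfull, if_neg cA, if_pos cB]
            simp
          · have hBfull : ¬ (cs[j] = 'B' ∧ (0 : Int) ≤ (j : Int) - 1 ∧ (j : Int) + 1 < (cs.length : Int) ∧
                cs[j - 1] = 'B' ∧ cs[j + 1] = 'B') := by
              rintro ⟨hb1, _, _, hb4, hb6⟩; exact cB ⟨hb4, hb1, hb6⟩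
            rw [if_neg hBfull, if_neg hAfull, if_neg cA, if_neg cB]
            simp
      rw [hstep, ih (j + 1) _ _ (by omega) (by omega)]
      have hdropm : cs.drop (j - 1) = cs[j - 1] :: cs[j] :: cs[j + 1] :: cs.drop (j + 2) := by
        rw [List.drop_eq_getElem_cons (by omega)]
        have h1 : j - 1 + 1 = j := by omega
        rw [h1, List.drop_eq_getElem_cons (by omega),
            List.drop_eq_getElem_cons (by omega)]
      have hdropj : cs.drop (j + 1 - 1) = cs[j] :: cs[j + 1] :: cs.drop (j + 2) := by
        have h1 : j + 1 - 1 = j := by omega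
        rw [h1, List.drop_eq_getElem_cons (by omega),
            List.drop_eq_getElem_cons (by omega)]
      rw [hdropm, hdropj, cnt_cons3, cnt_cons3]
      simp only [Prod.mk.injEq]; constructor <;> ring
    · -- j is the last index: no 3-window is centred at j, the step is a no-op
      have hstep : aStep cs (a, b) (j : Int) = (a, b) := by
        have hg : ¬ ((j : Int) + 1 < (cs.length : Int)) := by omega
        simp only [aStep]
        rw [if_neg (by rintro ⟨_, _, hh, _⟩; exact hg hh),
            if_neg (by rintro ⟨_, _, hh, _⟩; exact hg hh)]
      rw [hstep, ih (j + 1) _ _ (by omega) (by omega)]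
      have hlm : (cs.drop (j - 1)).length ≤ 2 := by rw [List.length_drop]; omega
      have hlj : (cs.drop (j + 1 - 1)).length ≤ 2 := by rw [List.length_drop]; omega
      rw [cnt_short _ _ hlm, cnt_short _ _ hlj, cnt_short _ _ hlm, cnt_short _ _ hlj]

lemma aFold_full (cs : List Char) :
    (PySem.List.pyRange 0 (cs.length : Int) 1).foldl (aStep cs) (0, 0)
      = (cnt 'A' cs, cnt 'B' cs) := by
  match cs with
  | [] => rfl
  | x :: t =>
    have hn : (0 : Int) < ((x :: t).length : Int) := by
      simp only [List.length_cons]; push_cast; omega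
    rw [PySem.List.pyRange_one_cons hn, List.foldl_cons]
    have hstep : aStep (x :: t) ((0 : Int), (0 : Int)) 0 = (0, 0) := by
      simp only [aStep]
      rw [if_neg (by rintro ⟨_, hh, _⟩; omega), if_neg (by rintro ⟨_, hh, _⟩; omega)]
    rw [hstep, show (0 : Int) + 1 = ((1 : Nat) : Int) by norm_num,
        aFold (x :: t) ((x :: t).length - 1) 1 0 0 rfl (by omega)]
    simp

-- ===== VERDICT (by name: the statement is the Claim_ definition above) =====
theorem solution_1393_5_spec : Claim_equal_solution_1393_5 := by
  intro colors _
  unfold Spec_solution_1393_5 solution_1393_5 solution_1393_5_alt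
  dsimp only
  rw [aFold_full, bLoop_eq colors.toList.length colors.toList le_rfl]
  simp only [Int.zero_add]
  by_cases h : cnt 'A' colors.toList ≤ cnt 'B' colors.toList
  · rw [if_pos h]
    simp [gt_iff_lt, not_lt.mpr h]
  · rw [if_neg h]
    simp [gt_iff_lt, lt_of_not_ge h]
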